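-- pv_equiv track=rewrite | github.com/OpenRobotLab/EmbodiedScan | models/EmbodiedScan/lry_utils/utils_read.py | reverse_multi2multi_mapping
-- ===== SOURCE A (Python) =====
-- def reverse_multi2multi_mapping(mapping):
--     """
--     Args:
--         mapping: dict in format key1:[value1, value2], key2:[value2, value3]
--     Returns:
--         mapping: dict in format value1:[key1], value2:[key1, key2], value3:[key2]
--     """
--     output = {}
--     possible_values = []
--     for key, values in mapping.items():
--         for value in values:
--             possible_values.append(value)
--     possible_values = list(set(possible_values))
--     for value in possible_values:
--         output[value] = []
--     for key, values in mapping.items():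
--         for value in values:
--             output[value].append(key)
--     return output
-- ===== SOURCE B (Python) =====
-- def reverse_multi2multi_mapping(mapping):
--     # value-major rebuild: collect the distinct values (first occurrence order),
--     # then build each value's key list by scanning the whole mapping for that value
--     seen = []
--     for values in mapping.values():
--         for v in values:
--             if v not in seen:
--                 seen.append(v)
--     return {v: [key for key, values in mapping.items() for u in values if u == v]
--             for v in seen}
-- ===== Notes on version B (the rewrite author's own statement) =====
-- stated objective: alternative
-- what changed: A accumulates output lists incrementally (collect values, set-dedup, pre-initialize empty lists, then append keys one by one); B is value-major: it collects the distinct values once and then builds each value's key list in full by a fresh scan of the whole mapping per value, never mutating a partially built list.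
import Mathlib
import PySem

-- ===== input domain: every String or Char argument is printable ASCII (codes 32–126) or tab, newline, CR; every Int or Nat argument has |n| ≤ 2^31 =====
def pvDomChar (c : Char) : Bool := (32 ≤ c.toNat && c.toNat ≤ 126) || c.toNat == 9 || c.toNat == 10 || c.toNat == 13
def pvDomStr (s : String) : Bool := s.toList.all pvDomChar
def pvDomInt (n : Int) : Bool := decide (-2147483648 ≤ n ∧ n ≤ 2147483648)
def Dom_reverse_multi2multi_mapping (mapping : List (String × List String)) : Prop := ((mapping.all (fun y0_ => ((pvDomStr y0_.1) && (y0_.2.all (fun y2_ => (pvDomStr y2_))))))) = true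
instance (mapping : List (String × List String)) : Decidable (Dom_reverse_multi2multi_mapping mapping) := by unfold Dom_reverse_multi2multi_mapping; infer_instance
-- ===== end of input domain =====

-- B replaces A's incremental append-to-dict accumulation by a value-major rebuild: collect the
-- distinct values, then build each value's key list in full by a fresh scan of the mapping per value
-- (alternative algorithm, not claimed faster).

-- ===== PORT A =====
def reverse_multi2multi_mapping (mapping : List (String × List String)) : List (String × List String) :=
  let output : PySem.Dict String (List String) := PySem.Dict.empty
  -- for key, values in mapping.items(): for value in values: possible_values.append(value)
  let possible_values : List String :=
    mapping.foldl (fun acc kv => kv.2.foldl (fun acc v => acc ++ [v]) acc) []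
  -- possible_values = list(set(possible_values))
  let possible_values := PySem.Set.ofList possible_values
  -- for value in possible_values: output[value] = []
  let output := possible_values.foldl (fun d v => d.insert v []) output
  -- for key, values in mapping.items(): for value in values: output[value].append(key)
  let output := mapping.foldl (fun d kv => kv.2.foldl (fun d v => d.modify v [] (fun l => l ++ [kv.1])) d) output
  output.items

-- ===== PORT B =====
def reverse_multi2multi_mapping_alt (mapping : List (String × List String)) : List (String × List String) :=
  -- seen: distinct values in first-occurrence order
  let seen : List String :=
    mapping.foldl (fun s kv => kv.2.foldl (fun s v => if s.contains v then s else s ++ [v]) s) []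
  -- {v: [key for key, values in mapping.items() for u in values if u == v] for v in seen}
  seen.map (fun v =>
    (v, mapping.flatMap (fun kv => (kv.2.filter (fun u => u == v)).map (fun _ => kv.1))))

-- ===== PRECONDITION & SPEC =====
def Spec_reverse_multi2multi_mapping (mapping : List (String × List String)) (out : List (String × List String)) : Prop := out = reverse_multi2multi_mapping_alt mapping
instance (mapping : List (String × List String)) (out : List (String × List String)) : Decidable (Spec_reverse_multi2multi_mapping mapping out) := by unfold Spec_reverse_multi2multi_mapping; infer_instance

-- ===== CLAIM =====
def Claim_equal_reverse_multi2multi_mapping : Prop := ∀ (mapping : List (String × List String)), Dom_reverse_multi2multi_mapping mapping → Spec_reverse_multi2multi_mapping mapping (reverse_multi2multi_mapping mapping)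

-- ===== LEMMAS AND PROOFS =====

-- The (value, key) pairs in traversal order.
def pvPairs (mapping : List (String × List String)) : List (String × String) :=
  mapping.flatMap (fun kv => kv.2.map (fun v => (v, kv.1)))

-- all values in traversal order
def pvVals (mapping : List (String × List String)) : List String :=
  (pvPairs mapping).map (·.1)

-- the common result: for each distinct value (first-occurrence order), the keys listing it, in order
def pvGroup (mapping : List (String × List String)) (v : String) : List String :=
  ((pvPairs mapping).filter (fun p => p.1 == v)).map (·.2)

theorem pvVals_cons (kv : String × List String) (rest : List (String × List String)) :
    pvVals (kv :: rest) = kv.2 ++ pvVals rest := by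
  simp [pvVals, pvPairs, Function.comp_def]

-- A's value-collection loop
theorem A_collect (mapping : List (String × List String)) (init : List String) :
    mapping.foldl (fun acc kv => kv.2.foldl (fun acc v => acc ++ [v]) acc) init
      = init ++ pvVals mapping := by
  induction mapping generalizing init with
  | nil => simp [pvVals, pvPairs]
  | cons kv rest ih =>
      rw [List.foldl_cons, ih, pvVals_cons, ← List.append_assoc]
      have h := PySem.List.foldl_append_singleton_eq_map (fun v : String => v) kv.2 init
      simp only [List.map_id_fun', id] at h
      rw [h]

-- A's append loop, flattened to a fold over the pair stream
theorem A_flatten (mapping : List (String × List String)) (d : PySem.Dict String (List String)) :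
    mapping.foldl (fun d kv => kv.2.foldl (fun d v => d.modify v [] (fun l => l ++ [kv.1])) d) d
      = (pvPairs mapping).foldl (fun d p => d.modify p.1 [] (fun l => l ++ [p.2])) d := by
  induction mapping generalizing d with
  | nil => rfl
  | cons kv rest ih =>
      simp only [pvPairs, List.flatMap_cons, List.foldl_cons, List.foldl_append, List.foldl_map]
      rw [ih]; rfl

-- updating a set with its own elements changes nothing
theorem update_self (vs : List String) :
    PySem.Set.update (PySem.Set.ofList vs) vs = PySem.Set.ofList vs := by
  rw [PySem.Set.update_eq_append_filter]
  have h : List.filter (fun y => !(PySem.Set.ofList vs).contains y) (PySem.Set.ofList vs) = [] := by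
    rw [List.filter_eq_nil_iff]
    intro a ha
    simp
    exact (PySem.Set.mem_ofList _ _).mp ha
  rw [h, List.append_nil]

-- A's pre-initialized dict, explicitly
theorem init_items (s : List String) (hs : s.Nodup) :
    (s.foldl (fun d v => d.insert v ([] : List String)) PySem.Dict.empty).items
      = s.map (fun v => (v, ([] : List String))) := by
  have h := PySem.Dict.items_foldl_insert_fresh s (fun v => v) (fun _ => ([] : List String))
    PySem.Dict.empty (by intro a _; simp) (by simpa using hs)
  simpa using h

theorem mk_map_getD (s : List String) (w : String) :
    (PySem.Dict.mk (s.map (fun v => (v, ([] : List String))))).getD w [] = [] := by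
  induction s with
  | nil => rfl
  | cons x xs ih =>
      simp only [List.map_cons, PySem.Dict.getD_eq_get?_getD, PySem.Dict.get?_mk_cons] at *
      split <;> simp [ih]

-- A's result, characterised
theorem A_items (mapping : List (String × List String)) :
    reverse_multi2multi_mapping mapping
      = (PySem.Set.ofList (pvVals mapping)).map (fun v => (v, pvGroup mapping v)) := by
  show (_ : PySem.Dict String (List String)).items = _
  rw [A_collect mapping [], List.nil_append, A_flatten]
  set s := PySem.Set.ofList (pvVals mapping) with hs
  have hnd : s.Nodup := PySem.Set.nodup_ofList _
  have hinit : (s.foldl (fun d v => d.insert v ([] : List String)) PySem.Dict.empty)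
      = PySem.Dict.mk (s.map (fun v => (v, ([] : List String)))) :=
    PySem.Dict.ext (init_items s hnd)
  rw [hinit]
  set D := (pvPairs mapping).foldl (fun d p => d.modify p.1 [] (fun l => l ++ [p.2]))
    (PySem.Dict.mk (s.map (fun v => (v, ([] : List String))))) with hD
  have hkeys : D.keys = s := by
    have h := PySem.Dict.keys_foldl_modify_key (pvPairs mapping) (fun p => p.1)
      ([] : List String) (fun _ p => fun l => l ++ [p.2])
      (PySem.Dict.mk (s.map (fun v => (v, ([] : List String)))))
    simp only [PySem.Dict.keys_mk, List.map_map] at h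
    have : (List.map ((fun x => x.1) ∘ fun v => (v, ([] : List String))) s) = s := by
      simp [Function.comp_def]
    rw [this] at h
    rw [hD]
    have hv : List.map (fun p : String × String => p.1) (pvPairs mapping) = pvVals mapping := rfl
    rw [h, hv, hs, update_self]
  have hgetD : ∀ v, D.getD v [] = pvGroup mapping v := by
    intro v
    rw [hD, PySem.Dict.getD_foldl_modify_append, mk_map_getD, List.nil_append]
    rfl
  rw [PySem.Dict.items_eq_map_keys D (hkeys ▸ hnd) [], hkeys]
  exact List.map_congr_left (fun v _ => by rw [hgetD v])

-- B's seen-loop is PySem.Set.ofList of the value stream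
theorem B_seen (mapping : List (String × List String)) (s0 : List String) :
    mapping.foldl (fun s kv => kv.2.foldl (fun s v => if s.contains v then s else s ++ [v]) s) s0
      = PySem.Set.update s0 (pvVals mapping) := by
  induction mapping generalizing s0 with
  | nil => rfl
  | cons kv rest ih =>
      rw [List.foldl_cons, ih, pvVals_cons]
      show PySem.Set.update (List.foldl PySem.Set.add s0 kv.2) (pvVals rest)
        = PySem.Set.update s0 (kv.2 ++ pvVals rest)
      simp [PySem.Set.update, List.foldl_append]

-- B's per-value comprehension is the group of that value
theorem B_group (mapping : List (String × List String)) (v : String) :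
    mapping.flatMap (fun kv => (kv.2.filter (fun u => u == v)).map (fun _ => kv.1))
      = pvGroup mapping v := by
  induction mapping with
  | nil => rfl
  | cons kv rest ih =>
      simp only [pvGroup, pvPairs, List.flatMap_cons, List.filter_append, List.map_append,
        List.filter_map, List.map_map] at *
      rw [ih]
      rfl

-- B's result, characterised: the same list
theorem B_items (mapping : List (String × List String)) :
    reverse_multi2multi_mapping_alt mapping
      = (PySem.Set.ofList (pvVals mapping)).map (fun v => (v, pvGroup mapping v)) := by
  show List.map _ _ = _
  rw [B_seen mapping []]
  have : PySem.Set.update ([] : List String) (pvVals mapping) = PySem.Set.ofList (pvVals mapping) :=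
    (PySem.Set.update_empty _)
  rw [this]
  exact List.map_congr_left (fun v _ => by rw [B_group])

-- ===== VERDICT =====
theorem reverse_multi2multi_mapping_spec : Claim_equal_reverse_multi2multi_mapping := by
  intro mapping _
  show reverse_multi2multi_mapping mapping = reverse_multi2multi_mapping_alt mapping
  rw [A_items, B_items]
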